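-- pv_equiv track=rewrite | github.com/Typher7/pythondsa | py3.py | ideal
-- ===== SOURCE A (Python) =====
-- def ideal(l, r):
--     count = 0
--     for i in range(l, r+1):
--         num = i
--         while (num % 3 == 0):
--             num //= 3
--         while (num % 5 == 0):
--             num //= 5
--
--
--         if num == 1:
--             count += 1
--
--     return count
-- ===== SOURCE B (Python) =====
-- def ideal(l, r):
--     prods = []
--     p3 = 1
--     while p3 <= r:
--         v = p3
--         while v <= r:
--             prods.append(v)
--             v *= 5
--         p3 *= 3
--     return len([x for x in prods if x >= l])
-- ===== Notes on version B (the rewrite author's own statement) =====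
-- stated objective: alternative
-- what changed: Instead of stripping factors 3 and 5 from every integer in [l,r], B enumerates all products 3^a*5^b up to r directly (nested multiply loops) and counts those >= l; intended as asymptotically faster (O(log^2 r) vs O((r-l) log r)) but a timing run could not confirm it consistently, so no speed is claimed.
import Mathlib
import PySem

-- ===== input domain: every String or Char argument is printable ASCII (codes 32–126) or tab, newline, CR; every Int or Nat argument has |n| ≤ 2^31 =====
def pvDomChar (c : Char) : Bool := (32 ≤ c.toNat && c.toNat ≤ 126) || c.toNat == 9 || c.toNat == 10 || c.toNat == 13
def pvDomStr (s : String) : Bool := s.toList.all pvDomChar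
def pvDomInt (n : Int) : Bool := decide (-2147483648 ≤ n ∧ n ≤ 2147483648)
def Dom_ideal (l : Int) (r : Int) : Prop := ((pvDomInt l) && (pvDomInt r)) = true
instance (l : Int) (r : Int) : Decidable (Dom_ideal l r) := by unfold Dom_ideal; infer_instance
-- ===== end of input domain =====

-- B enumerates all products 3^a*5^b ≤ r directly instead of A's per-integer factor
-- stripping over the whole range; equivalence is claimed on Pre_ (A never returns when 0 ∈ [l,r]).

-- ===== PORT A =====
-- 'while num % p == 0: num //= p' — the `num ≠ 0` conjunct only makes the loop total in Lean:
-- Python loops forever at num = 0, which Pre_ excludes from the claim.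
def stripLoop (p : Int) (num : Int) : Int :=
  if h : num ≠ 0 ∧ 2 ≤ p ∧ PySem.Int.mod num p = 0 then
    stripLoop p (PySem.Int.floordiv num p)
  else num
termination_by num.natAbs
decreasing_by
  obtain ⟨h0, hp, hm⟩ := h
  rw [PySem.Int.floordiv_eq_ediv_of_pos (by omega)]
  obtain ⟨k, hk⟩ := (PySem.Int.mod_eq_zero_iff_dvd _ _).mp hm
  subst hk
  rw [Int.mul_ediv_cancel_left _ (by omega)]
  have hk0 : k ≠ 0 := by rintro rfl; simp at h0
  have : k.natAbs ≠ 0 := by simpa using hk0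
  calc k.natAbs < 2 * k.natAbs := by omega
    _ ≤ (p * k).natAbs := by rw [Int.natAbs_mul]; exact Nat.mul_le_mul_right _ (by omega)

def ideal (l : Int) (r : Int) : Int :=
  (PySem.List.pyRange l (r + 1) 1).foldl (fun count i =>
    let num := stripLoop 5 (stripLoop 3 i)
    if num = 1 then count + 1 else count) 0

-- ===== PORT B =====
-- 'while v <= r: prods.append(v); v *= 5' — the `1 ≤ v` conjunct is for Lean termination only
-- (v starts at p3 ≥ 1 and only grows, so it is always true when the Python loop runs).
def inner5 (r : Int) (v : Int) (acc : List Int) : List Int :=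
  if _h : 1 ≤ v ∧ v ≤ r then inner5 r (v * 5) (acc ++ [v]) else acc
termination_by (r + 1 - v).toNat
decreasing_by
  obtain ⟨h1, h2⟩ := _h
  have : v + 4 ≤ v * 5 := by nlinarith
  omega

-- 'while p3 <= r: <inner loop>; p3 *= 3'
def outer3 (r : Int) (p3 : Int) (acc : List Int) : List Int :=
  if _h : 1 ≤ p3 ∧ p3 ≤ r then outer3 r (p3 * 3) (acc ++ inner5 r p3 []) else acc
termination_by (r + 1 - p3).toNat
decreasing_by
  obtain ⟨h1, h2⟩ := _h
  have : p3 + 2 ≤ p3 * 3 := by nlinarith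
  omega

def ideal_alt (l : Int) (r : Int) : Int :=
  (((outer3 r 1 []).filter (fun x => decide (l ≤ x))).length : Int)

-- ===== PRECONDITION & SPEC =====
-- Pre_ excludes exactly the inputs with l ≤ 0 ≤ r: there the loop body reaches i = 0 and A's
-- 'while num % 3 == 0: num //= 3' never terminates (0 // 3 == 0), so A returns no value.
def Pre_ideal (l : Int) (r : Int) : Prop := ¬(l ≤ 0 ∧ 0 ≤ r)
instance (l : Int) (r : Int) : Decidable (Pre_ideal l r) := by unfold Pre_ideal; infer_instance
def pvWitness_ideal : Int × Int := (1, 30)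

def Spec_ideal (l : Int) (r : Int) (out : Int) : Prop := out = ideal_alt l r
instance (l : Int) (r : Int) (out : Int) : Decidable (Spec_ideal l r out) := by unfold Spec_ideal; infer_instance

-- ===== CLAIM (what is proved, stated in full; the proofs are below) =====
def Claim_equal_ideal : Prop := ∀ (l : Int) (r : Int), Dom_ideal l r → Pre_ideal l r → Spec_ideal l r (ideal l r)

-- ===== LEMMAS AND PROOFS =====

-- A's fold is a countP over the range.
lemma ideal_eq_countP (l r : Int) :
    ideal l r = ((PySem.List.pyRange l (r + 1) 1).countP
      (fun i => decide (stripLoop 5 (stripLoop 3 i) = 1)) : Int) := by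
  unfold ideal
  simpa using PySem.List.foldl_count_if
    (fun i => decide (stripLoop 5 (stripLoop 3 i) = 1)) (PySem.List.pyRange l (r + 1) 1) 0

-- stripLoop leaves a non-multiple unchanged.
lemma stripLoop_of_not_dvd (p n : Int) (h : ¬ p ∣ n) : stripLoop p n = n := by
  rw [stripLoop]
  rw [dif_neg]
  simp [PySem.Int.mod_eq_zero_iff_dvd, h]

-- one unfolding of the loop on a proper multiple.
lemma stripLoop_step (p k : Int) (hp : 2 ≤ p) (hk : k ≠ 0) :
    stripLoop p (p * k) = stripLoop p k := by
  rw [stripLoop]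
  rw [dif_pos ⟨by intro h; rcases mul_eq_zero.mp h with h | h <;> omega, hp,
      (PySem.Int.mod_eq_zero_iff_dvd _ _).mpr ⟨k, rfl⟩⟩]
  rw [PySem.Int.floordiv_eq_ediv_of_pos (by omega), Int.mul_ediv_cancel_left _ (by omega)]

-- decomposition: a positive n is p^a times its stripped value, which is positive and not divisible by p.
lemma stripLoop_decomp (p n : Int) (hp : 2 ≤ p) (hn : 1 ≤ n) :
    ∃ a : Nat, n = p ^ a * stripLoop p n ∧ ¬ p ∣ stripLoop p n ∧ 1 ≤ stripLoop p n := by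
  have H : ∀ N : Nat, ∀ n : Int, n.natAbs ≤ N → 1 ≤ n →
      ∃ a : Nat, n = p ^ a * stripLoop p n ∧ ¬ p ∣ stripLoop p n ∧ 1 ≤ stripLoop p n := by
    intro N
    induction N with
    | zero => intro n hle h1; omega
    | succ N ih =>
      intro n hle h1
      by_cases hd : p ∣ n
      · obtain ⟨k, rfl⟩ := hd
        have hk1 : 1 ≤ k := by nlinarith
        have hmeas : k.natAbs ≤ N := by
          have : k.natAbs < (p * k).natAbs := by
            rw [Int.natAbs_mul]
            have h1' : 1 ≤ k.natAbs := by omega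
            have hp2 : 2 ≤ p.natAbs := by omega
            calc k.natAbs < 2 * k.natAbs := by omega
              _ ≤ p.natAbs * k.natAbs := Nat.mul_le_mul_right _ hp2
          omega
        obtain ⟨a, ha, hnd, hpos⟩ := ih k hmeas hk1
        rw [stripLoop_step p k hp (by omega)]
        exact ⟨a + 1, by rw [pow_succ]; nlinarith [ha], hnd, hpos⟩
      · rw [stripLoop_of_not_dvd p n hd]
        exact ⟨0, by ring, hd, h1⟩
  exact H n.natAbs n le_rfl hn

-- computation: stripping p from p^a * m (p ∤ m, m ≠ 0) yields m.
lemma stripLoop_pow_mul (p : Int) (a : Nat) (m : Int) (hp : 2 ≤ p) (hm0 : m ≠ 0)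
    (hm : ¬ p ∣ m) : stripLoop p (p ^ a * m) = m := by
  induction a with
  | zero => simpa using stripLoop_of_not_dvd p m hm
  | succ a ih =>
    have h : p ^ (a + 1) * m = p * (p ^ a * m) := by ring
    rw [h, stripLoop_step p _ hp (by positivity), ih]

-- a negative number strips to a negative number.
lemma stripLoop_neg (p n : Int) (hn : n ≤ -1) : stripLoop p n ≤ -1 := by
  have H : ∀ N : Nat, ∀ n : Int, n.natAbs ≤ N → n ≤ -1 → stripLoop p n ≤ -1 := by
    intro N
    induction N with
    | zero => intro n hle h1; omega
    | succ N ih =>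
      intro n hle h1
      by_cases hc : 2 ≤ p ∧ p ∣ n
      · obtain ⟨hp, k, rfl⟩ := hc
        have hk1 : k ≤ -1 := by nlinarith
        rw [stripLoop_step p k hp (by omega)]
        apply ih k _ hk1
        have : k.natAbs < (p * k).natAbs := by
          rw [Int.natAbs_mul]
          have h1' : 1 ≤ k.natAbs := by omega
          have hp2 : 2 ≤ p.natAbs := by omega
          calc k.natAbs < 2 * k.natAbs := by omega
            _ ≤ p.natAbs * k.natAbs := Nat.mul_le_mul_right _ hp2
        omega
      · rw [stripLoop]
        rw [dif_neg]
        · exact h1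
        · rw [PySem.Int.mod_eq_zero_iff_dvd]
          intro ⟨_, hp, hd⟩
          exact hc ⟨hp, hd⟩
  exact H n.natAbs n le_rfl hn

lemma not_three_dvd_five_pow (b : Nat) : ¬ (3:Int) ∣ 5 ^ b := by
  intro h
  have := Int.Prime.dvd_pow' (p := 3) (by norm_num) h
  norm_num at this

-- the predicate A tests is exactly "n is of the form 3^a * 5^b" (for positive n).
lemma strip_iff_smooth (n : Int) (hn : 1 ≤ n) :
    stripLoop 5 (stripLoop 3 n) = 1 ↔ ∃ a b : Nat, n = 3 ^ a * 5 ^ b := by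
  constructor
  · intro h
    obtain ⟨a, ha, _, hpos⟩ := stripLoop_decomp 3 n (by norm_num) hn
    obtain ⟨b, hb, _, _⟩ := stripLoop_decomp 5 (stripLoop 3 n) (by norm_num) hpos
    rw [h, mul_one] at hb
    exact ⟨a, b, by rw [ha, hb]⟩
  · rintro ⟨a, b, rfl⟩
    rw [stripLoop_pow_mul 3 a (5 ^ b) (by norm_num) (by positivity) (not_three_dvd_five_pow b)]
    have h5 : (5:Int) ^ b = 5 ^ b * 1 := by ring
    rw [h5, stripLoop_pow_mul 5 b 1 (by norm_num) one_ne_zero (by norm_num)]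

lemma le_mul_pow (v : Int) (hv : 1 ≤ v) (c b : Int) (hc : 1 ≤ c) (hb : 1 ≤ b) :
    v ≤ v * c * b := by
  have h1 : v ≤ v * c := le_mul_of_one_le_right (by omega) hc
  have h2 : v * c ≤ v * c * b := le_mul_of_one_le_right (by omega) hb
  omega

-- membership in the inner loop's result.
lemma inner5_mem (r v : Int) (acc : List Int) (hv : 1 ≤ v) (x : Int) :
    x ∈ inner5 r v acc ↔ x ∈ acc ∨ ∃ b : Nat, x = v * 5 ^ b ∧ x ≤ r := by
  have H : ∀ N : Nat, ∀ v : Int, ∀ acc : List Int, (r + 1 - v).toNat ≤ N → 1 ≤ v →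
      (x ∈ inner5 r v acc ↔ x ∈ acc ∨ ∃ b : Nat, x = v * 5 ^ b ∧ x ≤ r) := by
    intro N
    induction N with
    | zero =>
      intro v acc hle hv
      have hgt : r < v := by omega
      rw [inner5, dif_neg (by omega)]
      simp only [iff_self_or]
      rintro ⟨b, rfl, hbr⟩
      have h1 : (1:Int) ≤ 5 ^ b := one_le_pow₀ (by norm_num)
      have : v ≤ v * 5 ^ b := le_mul_of_one_le_right (by omega) h1
      omega
    | succ N ih =>
      intro v acc hle hv
      by_cases hvr : v ≤ r
      · rw [inner5, dif_pos ⟨hv, hvr⟩]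
        have hmeas : (r + 1 - v * 5).toNat ≤ N := by
          have : v + 4 ≤ v * 5 := by nlinarith
          omega
        rw [ih (v * 5) (acc ++ [v]) hmeas (by nlinarith)]
        simp only [List.mem_append, List.mem_singleton, or_assoc]
        constructor
        · rintro (hx | hx | ⟨b, rfl, hbr⟩)
          · exact Or.inl hx
          · exact Or.inr ⟨0, by simpa using hx, by omega⟩
          · exact Or.inr ⟨b + 1, by ring, hbr⟩
        · rintro (hx | ⟨b, rfl, hbr⟩)
          · exact Or.inl hx
          · cases b with
            | zero => exact Or.inr (Or.inl (by simp))
            | succ b => exact Or.inr (Or.inr ⟨b, by ring, hbr⟩)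
      · rw [inner5, dif_neg (by omega)]
        simp only [iff_self_or]
        rintro ⟨b, rfl, hbr⟩
        have h1 : (1:Int) ≤ 5 ^ b := one_le_pow₀ (by norm_num)
        have : v ≤ v * 5 ^ b := le_mul_of_one_le_right (by omega) h1
        omega
  exact H (r + 1 - v).toNat v acc le_rfl hv

-- the inner loop preserves strict sortedness (hence produces a Nodup block).
lemma inner5_pairwise (r v : Int) (acc : List Int) (hv : 1 ≤ v)
    (hacc : acc.Pairwise (· < ·)) (hlt : ∀ y ∈ acc, y < v) :
    (inner5 r v acc).Pairwise (· < ·) := by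
  have H : ∀ N : Nat, ∀ v : Int, ∀ acc : List Int, (r + 1 - v).toNat ≤ N → 1 ≤ v →
      acc.Pairwise (· < ·) → (∀ y ∈ acc, y < v) → (inner5 r v acc).Pairwise (· < ·) := by
    intro N
    induction N with
    | zero =>
      intro v acc hle hv hacc hlt
      rw [inner5, dif_neg (by omega)]
      exact hacc
    | succ N ih =>
      intro v acc hle hv hacc hlt
      by_cases hvr : v ≤ r
      · rw [inner5, dif_pos ⟨hv, hvr⟩]
        apply ih (v * 5) (acc ++ [v])
        · have : v + 4 ≤ v * 5 := by nlinarith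
          omega
        · nlinarith
        · rw [List.pairwise_append]
          exact ⟨hacc, by simp, by simpa using hlt⟩
        · intro y hy
          rcases List.mem_append.mp hy with hy | hy
          · have := hlt y hy; nlinarith
          · have : y = v := by simpa using hy
            nlinarith
      · rw [inner5, dif_neg (by omega)]
        exact hacc
  exact H (r + 1 - v).toNat v acc le_rfl hv hacc hlt

-- membership in the outer loop's result.
lemma outer3_mem (r p3 : Int) (acc : List Int) (hp : 1 ≤ p3) (x : Int) :
    x ∈ outer3 r p3 acc ↔ x ∈ acc ∨ ∃ a b : Nat, x = p3 * 3 ^ a * 5 ^ b ∧ x ≤ r := by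
  have H : ∀ N : Nat, ∀ p3 : Int, ∀ acc : List Int, (r + 1 - p3).toNat ≤ N → 1 ≤ p3 →
      (x ∈ outer3 r p3 acc ↔ x ∈ acc ∨ ∃ a b : Nat, x = p3 * 3 ^ a * 5 ^ b ∧ x ≤ r) := by
    intro N
    induction N with
    | zero =>
      intro p3 acc hle hp
      rw [outer3, dif_neg (by omega)]
      simp only [iff_self_or]
      rintro ⟨a, b, rfl, hbr⟩
      have h3 : (1:Int) ≤ 3 ^ a := one_le_pow₀ (by norm_num)
      have h5 : (1:Int) ≤ 5 ^ b := one_le_pow₀ (by norm_num)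
      have := le_mul_pow p3 hp _ _ h3 h5
      omega
    | succ N ih =>
      intro p3 acc hle hp
      by_cases hpr : p3 ≤ r
      · rw [outer3, dif_pos ⟨hp, hpr⟩]
        have hmeas : (r + 1 - p3 * 3).toNat ≤ N := by
          have : p3 + 2 ≤ p3 * 3 := by nlinarith
          omega
        rw [ih (p3 * 3) _ hmeas (by nlinarith)]
        simp only [List.mem_append, or_assoc]
        rw [inner5_mem r p3 [] hp x]
        simp only [List.not_mem_nil, false_or]
        constructor
        · rintro (hx | ⟨b, rfl, hbr⟩ | ⟨a, b, rfl, hbr⟩)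
          · exact Or.inl hx
          · exact Or.inr ⟨0, b, by ring, hbr⟩
          · exact Or.inr ⟨a + 1, b, by ring, hbr⟩
        · rintro (hx | ⟨a, b, rfl, hbr⟩)
          · exact Or.inl hx
          · cases a with
            | zero => exact Or.inr (Or.inl ⟨b, by ring, hbr⟩)
            | succ a => exact Or.inr (Or.inr ⟨a, b, by ring, hbr⟩)
      · rw [outer3, dif_neg (by omega)]
        simp only [iff_self_or]
        rintro ⟨a, b, rfl, hbr⟩
        have h3 : (1:Int) ≤ 3 ^ a := one_le_pow₀ (by norm_num)
        have h5 : (1:Int) ≤ 5 ^ b := one_le_pow₀ (by norm_num)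
        have := le_mul_pow p3 hp _ _ h3 h5
        omega
  exact H (r + 1 - p3).toNat p3 acc le_rfl hp

-- the outer loop's result has no duplicates.
lemma outer3_nodup (r p3 : Int) (acc : List Int) (hp : 1 ≤ p3) (hacc : acc.Nodup)
    (hrep : ∀ y ∈ acc, ∀ a b : Nat, y ≠ p3 * 3 ^ a * 5 ^ b) :
    (outer3 r p3 acc).Nodup := by
  have H : ∀ N : Nat, ∀ p3 : Int, ∀ acc : List Int, (r + 1 - p3).toNat ≤ N → 1 ≤ p3 →
      acc.Nodup → (∀ y ∈ acc, ∀ a b : Nat, y ≠ p3 * 3 ^ a * 5 ^ b) →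
      (outer3 r p3 acc).Nodup := by
    intro N
    induction N with
    | zero =>
      intro p3 acc hle hp hacc hrep
      rw [outer3, dif_neg (by omega)]
      exact hacc
    | succ N ih =>
      intro p3 acc hle hp hacc hrep
      by_cases hpr : p3 ≤ r
      · rw [outer3, dif_pos ⟨hp, hpr⟩]
        apply ih (p3 * 3) (acc ++ inner5 r p3 [])
        · have : p3 + 2 ≤ p3 * 3 := by nlinarith
          omega
        · nlinarith
        · rw [List.nodup_append]
          refine ⟨hacc, ?_, ?_⟩
          · exact (inner5_pairwise r p3 [] hp (by simp) (by simp)).nodup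
          · intro y hy z hz
            rcases (inner5_mem r p3 [] hp z).mp hz with h | ⟨b, hz', _⟩
            · simp at h
            · intro hc
              exact hrep y hy 0 b (by rw [hc, hz']; ring)
        · intro y hy a b
          rcases List.mem_append.mp hy with hy | hy
          · have := hrep y hy (a + 1) b
            intro hc; apply this; rw [hc]; ring
          · rcases (inner5_mem r p3 [] hp y).mp hy with h | ⟨c, rfl, _⟩
            · simp at h
            · intro hc
              have hp0 : p3 ≠ 0 := by omega
              have hcancel : (5:Int) ^ c = 3 * 3 ^ a * 5 ^ b :=
                mul_left_cancel₀ hp0 (by linarith [hc] : p3 * 5 ^ c = p3 * (3 * 3 ^ a * 5 ^ b))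
              exact not_three_dvd_five_pow c ⟨3 ^ a * 5 ^ b, by rw [hcancel]; ring⟩
      · rw [outer3, dif_neg (by omega)]
        exact hacc
  exact H (r + 1 - p3).toNat p3 acc le_rfl hp hacc hrep

-- ===== VERDICT (by name: the statement is the Claim_ definition above) =====
theorem ideal_spec : Claim_equal_ideal := by
  intro l r _ hpre
  unfold Spec_ideal ideal_alt
  rw [ideal_eq_countP, List.countP_eq_length_filter]
  by_cases hl : 1 ≤ l
  · have hperm : ((PySem.List.pyRange l (r + 1) 1).filter
        (fun i => decide (stripLoop 5 (stripLoop 3 i) = 1))).Perm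
        ((outer3 r 1 []).filter (fun x => decide (l ≤ x))) := by
      rw [List.perm_ext_iff_of_nodup ((PySem.List.nodup_pyRange_one _ _).filter _)
          ((outer3_nodup r 1 [] (by norm_num) (by simp) (by simp)).filter _)]
      intro x
      simp only [List.mem_filter, PySem.List.mem_pyRange_one, decide_eq_true_eq]
      rw [outer3_mem r 1 [] (by norm_num) x]
      simp only [List.not_mem_nil, false_or, one_mul]
      constructor
      · rintro ⟨⟨hlx, hxr⟩, hstrip⟩
        obtain ⟨a, b, rfl⟩ := (strip_iff_smooth x (by omega)).mp hstrip
        exact ⟨⟨a, b, rfl, by omega⟩, hlx⟩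
      · rintro ⟨⟨a, b, rfl, hxr⟩, hlx⟩
        exact ⟨⟨hlx, by omega⟩, (strip_iff_smooth _ (by omega)).mpr ⟨a, b, rfl⟩⟩
    rw [hperm.length_eq]
  · have hr : r ≤ -1 := by unfold Pre_ideal at hpre; omega
    rw [outer3, dif_neg (by omega)]
    have hnone : ∀ i ∈ PySem.List.pyRange l (r + 1) 1,
        ¬ (decide (stripLoop 5 (stripLoop 3 i) = 1) = true) := by
      intro i hi
      have hi' : i ≤ -1 := by
        have := (PySem.List.mem_pyRange_one).mp hi
        omega
      have h5 := stripLoop_neg 5 _ (stripLoop_neg 3 i hi')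
      simp only [decide_eq_true_eq]
      omega
    rw [List.filter_eq_nil_iff.mpr hnone]
    simp
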